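-- pv_equiv track=rewrite | github.com/Christine-Hao/Markov | Markov/markov.py | get_grams
-- ===== SOURCE A (Python) =====
-- def get_grams(text, k):
--     """ (str, int) -> dict
--     Returns a dictionary of k-grams as described above, using the input string
--     text and the given positive integer k.
--     >>> get_grams('gagggagaggcgagaaa', 2)
--     {'ga': {'g': 4, 'a': 1}, 'ag': {'g': 2, 'a': 2}, 'gg': {'g': 1, 'a': 1, 'c': 1}, 'gc': {'g': 1}, 'cg': {'a': 1}, 'aa': {'a': 1}}
--
--     >>> get_grams("She sells sea shells by the sea shore.", 1)
--     {'S': {'h': 1}, 'h': {'e': 3, 'o': 1}, 'e': {' ': 2, 'l': 2, 'a': 2, '.': 1}, ' ': {'s': 5, 'b': 1, 't': 1}, 's': {'e': 3, ' ': 2, 'h': 2}, 'l': {'l': 2, 's': 2}, 'a': {' ': 2}, 'b': {'y': 1}, 'y': {' ': 1}, 't': {'h': 1}, 'o': {'r': 1}, 'r': {'e': 1}}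
--
--     >>> get_grams('aaoaaobo', 3)
--     {'aao': {'a': 1, 'b': 1}, 'aoa': {'a': 1}, 'oaa': {'o': 1}, 'aob': {'o': 1}}
--
--     >>> get_grams('I, i, ', 2)
--     {'I,': {' ': 1}, ', ': {'i': 1}, ' i': {',': 1}, 'i,': {' ': 1}}
--
--     >>> get_grams('aasd', 2)
--     {'aa': {'s': 1}, 'as': {'d': 1}}
--
--     get_grams('sdaaa', 2)
--     {'sd': {'a': 1}, 'da': {'a': 1}, 'aa': {'a': 1}}
--     """
--
--     final_dict = {} #create an empty dictionnary
--
--     end = len(text)-k#To avoid looping through the last k characters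
--
--     i = 0
--     #To loop thorugh the text except the last k characters
--     while i < end:
--         key = text[i:i+k] #to find one possible key
--
--         if key not in final_dict: #If the key is not contained already in the fianl_dict
--             final_dict[key] = {} #put the key in the final dictionnary
--
--
--         subkey = text[i+k] #find what occurs next to the key
--
--         if subkey in final_dict[key]: #If the subkey is already contained in the dict of the given key
--             final_dict[key][subkey] += 1 #Add one occurence to the subkey
--
--         else: # If the subkey is not contained in the dict of the given key
--             final_dict[key][subkey] = 1 #create a new subkey and paire it with the value of 1 (its occurence)
--         i+=1
--     return final_dict
-- ===== SOURCE B (Python) =====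
-- def get_grams(text, k):
--     # Pass 1: flat tally of (kgram, next_char) pairs.
--     pairs = [(text[i:i+k], text[i+k]) for i in range(len(text) - k)]
--     counts = {}
--     for p in pairs:
--         counts[p] = counts.get(p, 0) + 1
--     # Pass 2: regroup the flat table into the nested dict.
--     final_dict = {}
--     for (kgram, nxt), c in counts.items():
--         final_dict.setdefault(kgram, {})[nxt] = c
--     return final_dict
-- ===== Notes on version B (the rewrite author's own statement) =====
-- stated objective: alternative
-- what changed: B replaces A's single incremental nested-dict-update while loop by two differently-shaped passes: first a flat tally keyed by (kgram, next_char) pairs, then a regrouping pass over that flat table that builds the nested dict.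
import Mathlib
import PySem

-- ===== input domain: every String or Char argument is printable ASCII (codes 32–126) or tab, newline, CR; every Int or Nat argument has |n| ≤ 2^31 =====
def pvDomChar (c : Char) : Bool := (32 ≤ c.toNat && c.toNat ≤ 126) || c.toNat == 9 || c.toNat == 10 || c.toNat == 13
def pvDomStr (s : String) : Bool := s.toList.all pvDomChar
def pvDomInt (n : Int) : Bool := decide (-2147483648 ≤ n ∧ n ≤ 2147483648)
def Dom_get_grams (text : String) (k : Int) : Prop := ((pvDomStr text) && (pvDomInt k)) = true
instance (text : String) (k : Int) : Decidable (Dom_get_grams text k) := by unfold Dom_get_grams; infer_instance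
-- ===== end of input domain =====

-- B replaces A's incremental nested-dict-update loop by two passes: a flat (kgram, next_char) tally,
-- then a regrouping pass over that flat table; same cost, different decomposition (objective: alternative).

-- shared helper: text[j] as a 1-character string ("" only where Python raises IndexError, excluded by Pre_)
def pvSub (text : String) (j : Int) : String :=
  match PySem.Str.pyGet? text j with
  | some c => String.mk [c]
  | none => ""

-- ===== PORT A =====
def get_grams (text : String) (k : Int) : List (String × List (String × Int)) :=
  let final : PySem.Dict String (PySem.Dict String Int) :=
    (PySem.List.pyRange 0 ((PySem.Str.len text : Int) - k) 1).foldl (fun d i =>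
      let key := PySem.Str.slice text (some i) (some (i + k))
      let d := if d.contains key then d else d.insert key PySem.Dict.empty
      let subkey := pvSub text (i + k)
      let m := d.getD key PySem.Dict.empty
      if m.contains subkey then d.insert key (m.insert subkey (m.getD subkey 0 + 1))
      else d.insert key (m.insert subkey 1)) PySem.Dict.empty
  final.items.map (fun p => (p.1, p.2.items))

-- ===== PORT B =====
def get_grams_alt (text : String) (k : Int) : List (String × List (String × Int)) :=
  let pairs : List (String × String) :=
    (PySem.List.pyRange 0 ((PySem.Str.len text : Int) - k) 1).map
      (fun i => (PySem.Str.slice text (some i) (some (i + k)), pvSub text (i + k)))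
  let counts : PySem.Dict (String × String) Int :=
    pairs.foldl (fun c p => c.insert p (c.getD p 0 + 1)) PySem.Dict.empty
  let final : PySem.Dict String (PySem.Dict String Int) :=
    counts.items.foldl (fun r q =>
      let r := r.setdefault q.1.1 PySem.Dict.empty
      r.insert q.1.1 ((r.getD q.1.1 PySem.Dict.empty).insert q.1.2 q.2)) PySem.Dict.empty
  final.items.map (fun p => (p.1, p.2.items))

-- ===== PRECONDITION & SPEC =====
-- Pre_ excludes exactly the inputs where Python A raises IndexError (text[i+k] with k < -len(text)).
def Pre_get_grams (text : String) (k : Int) : Prop := -(PySem.Str.len text : Int) ≤ k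
instance (text : String) (k : Int) : Decidable (Pre_get_grams text k) := by unfold Pre_get_grams; infer_instance
def pvWitness_get_grams : String × Int := ("gagggagaggcgagaaa", 2)

def Spec_get_grams (text : String) (k : Int) (out : List (String × List (String × Int))) : Prop := out = get_grams_alt text k
instance (text : String) (k : Int) (out : List (String × List (String × Int))) : Decidable (Spec_get_grams text k out) := by unfold Spec_get_grams; infer_instance

-- ===== CLAIM (what is proved, stated in full; the proofs are below) =====
def Claim_equal_get_grams : Prop := ∀ (text : String) (k : Int), Dom_get_grams text k → Pre_get_grams text k → Spec_get_grams text k (get_grams text k)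

-- ===== LEMMAS AND PROOFS =====

-- normal form of A's loop body
def pvNadd (d : PySem.Dict String (PySem.Dict String Int)) (p : String × String) :
    PySem.Dict String (PySem.Dict String Int) :=
  d.insert p.1 ((d.getD p.1 PySem.Dict.empty).insert p.2
    ((d.getD p.1 PySem.Dict.empty).getD p.2 0 + 1))

-- normal form of B's regrouping body
def pvRadd (r : PySem.Dict String (PySem.Dict String Int)) (q : (String × String) × Int) :
    PySem.Dict String (PySem.Dict String Int) :=
  r.insert q.1.1 ((r.getD q.1.1 PySem.Dict.empty).insert q.1.2 q.2)

theorem nadd_eq (d : PySem.Dict String (PySem.Dict String Int)) (key subkey : String) :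
    (let d' := if d.contains key then d else d.insert key PySem.Dict.empty
     let m := d'.getD key PySem.Dict.empty
     if m.contains subkey then d'.insert key (m.insert subkey (m.getD subkey 0 + 1))
     else d'.insert key (m.insert subkey 1)) = pvNadd d (key, subkey) := by
  cases hc : d.contains key with
  | true =>
    cases hm : (d.getD key PySem.Dict.empty).contains subkey with
    | true => simp [pvNadd, hc, hm]
    | false => simp [pvNadd, hc, hm, PySem.Dict.getD_of_not_contains _ _ hm]
  | false =>
    have h0 : (PySem.Dict.empty : PySem.Dict String Int).contains subkey = false := by
      simp [PySem.Dict.contains_empty]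
    simp [pvNadd, hc, PySem.Dict.getD_insert_self, PySem.Dict.insert_insert_self, h0,
      PySem.Dict.getD_of_not_contains _ _ hc]

theorem radd_eq (r : PySem.Dict String (PySem.Dict String Int)) (q : (String × String) × Int) :
    (let r' := r.setdefault q.1.1 PySem.Dict.empty
     r'.insert q.1.1 ((r'.getD q.1.1 PySem.Dict.empty).insert q.1.2 q.2)) = pvRadd r q := by
  cases hc : r.contains q.1.1 with
  | true => simp [pvRadd, PySem.Dict.setdefault_of_contains _ _ hc]
  | false =>
    simp [pvRadd, PySem.Dict.setdefault_of_not_contains _ _ hc,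
      PySem.Dict.insert_insert_self, PySem.Dict.getD_of_not_contains _ _ hc]

theorem getD_foldl_nadd (P : List (String × String)) (d : PySem.Dict String (PySem.Dict String Int)) (g : String) :
    (P.foldl pvNadd d).getD g PySem.Dict.empty
      = ((P.filter (fun p => p.1 == g)).map (·.2)).foldl
          (fun m s => m.insert s (m.getD s 0 + 1)) (d.getD g PySem.Dict.empty) := by
  induction P generalizing d with
  | nil => rfl
  | cons p P ih =>
    rw [List.foldl_cons, ih, List.filter_cons]
    by_cases h1 : p.1 = g
    · simp only [h1, beq_self_eq_true, if_pos, List.map_cons, List.foldl_cons, pvNadd,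
        PySem.Dict.getD_insert_self]
    · have : (p.1 == g) = false := beq_eq_false_iff_ne.mpr h1
      simp [this, pvNadd, PySem.Dict.getD_insert_of_ne _ _ _ (fun hgp => h1 hgp.symm)]

theorem getD_foldl_radd (L : List ((String × String) × Int)) (r : PySem.Dict String (PySem.Dict String Int)) (g : String) :
    (L.foldl pvRadd r).getD g PySem.Dict.empty
      = (L.filter (fun q => q.1.1 == g)).foldl
          (fun m q => m.insert q.1.2 q.2) (r.getD g PySem.Dict.empty) := by
  induction L generalizing r with
  | nil => rfl
  | cons q L ih =>
    rw [List.foldl_cons, ih, List.filter_cons]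
    by_cases h1 : q.1.1 = g
    · simp only [h1, beq_self_eq_true, if_pos, List.foldl_cons, pvRadd,
        PySem.Dict.getD_insert_self]
    · have : (q.1.1 == g) = false := beq_eq_false_iff_ne.mpr h1
      simp [this, pvRadd, PySem.Dict.getD_insert_of_ne _ _ _ (fun hgp => h1 hgp.symm)]

theorem count_snd_filter (P : List (String × String)) (g s : String) :
    ((P.filter (fun p => p.1 == g)).map (·.2)).count s = P.count (g, s) := by
  induction P with
  | nil => rfl
  | cons p P ih =>
    by_cases h1 : p.1 = g
    · by_cases h2 : p.2 = s
      · simp [List.filter_cons, h1, List.count_cons, h2, ih, Prod.ext_iff]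
      · simp [List.filter_cons, h1, List.count_cons, h2, ih, Prod.ext_iff]
    · simp [List.filter_cons, h1, List.count_cons, ih, Prod.ext_iff]

theorem ofList_map_ofList {α β : Type} [BEq α] [LawfulBEq α] [BEq β] [LawfulBEq β]
    (f : α → β) (l : List α) :
    PySem.Set.ofList ((PySem.Set.ofList l).map f) = PySem.Set.ofList (l.map f) := by
  induction l using List.reverseRecOn with
  | nil => rfl
  | append_singleton xs x ih =>
    rw [PySem.Set.ofList_append_singleton, PySem.Set.add_eq_ite]
    by_cases hx : x ∈ PySem.Set.ofList xs
    · rw [if_pos hx, ih, List.map_append, List.map_singleton,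
        PySem.Set.ofList_append_singleton, PySem.Set.add_eq_ite, if_pos]
      rw [PySem.Set.mem_ofList] at hx ⊢
      exact List.mem_map_of_mem hx
    · rw [if_neg hx, List.map_append, List.map_singleton, PySem.Set.ofList_append_singleton,
        ih, List.map_append, List.map_singleton, PySem.Set.ofList_append_singleton]

theorem map_snd_filter_ofList (P : List (String × String)) (g : String) :
    ((PySem.Set.ofList P).filter (fun p => p.1 == g)).map (·.2)
      = PySem.Set.ofList ((P.filter (fun p => p.1 == g)).map (·.2)) := by
  induction P using List.reverseRecOn with
  | nil => rfl
  | append_singleton xs x ih =>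
    rw [PySem.Set.ofList_append_singleton, PySem.Set.add_eq_ite]
    by_cases hx : x ∈ PySem.Set.ofList xs
    · rw [if_pos hx, ih, List.filter_append, List.map_append]
      by_cases h1 : x.1 = g
      · have hmem : x.2 ∈ PySem.Set.ofList ((xs.filter (fun p => p.1 == g)).map (·.2)) := by
          rw [PySem.Set.mem_ofList]
          exact List.mem_map_of_mem (List.mem_filter.mpr ⟨(PySem.Set.mem_ofList _ _).mp hx, by simp [h1]⟩)
        simp [List.filter_singleton, h1, PySem.Set.ofList_append_singleton,
          PySem.Set.add_eq_ite, hmem]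
      · simp [List.filter_singleton, beq_eq_false_iff_ne.mpr h1]
    · rw [if_neg hx, List.filter_append, List.map_append, List.filter_append, List.map_append, ih]
      by_cases h1 : x.1 = g
      · have hnm : x.2 ∉ PySem.Set.ofList ((xs.filter (fun p => p.1 == g)).map (·.2)) := by
          rw [PySem.Set.mem_ofList]
          intro hm
          obtain ⟨q, hq, hq2⟩ := List.mem_map.mp hm
          obtain ⟨hqxs, hq1⟩ := List.mem_filter.mp hq
          apply hx
          rw [PySem.Set.mem_ofList]
          have : q = x := Prod.ext (by rw [beq_iff_eq] at hq1; rw [hq1, h1]) hq2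
          rwa [← this]
        simp [List.filter_singleton, h1, PySem.Set.ofList_append_singleton,
          PySem.Set.add_eq_ite, hnm]
      · simp [List.filter_singleton, beq_eq_false_iff_ne.mpr h1]

theorem regroup_counter (P : List (String × String)) :
    ((PySem.Dict.counter P).items.foldl pvRadd PySem.Dict.empty) = P.foldl pvNadd PySem.Dict.empty := by
  set L := (PySem.Dict.counter P).items with hL
  have hNfun : pvNadd = fun d (p : String × String) => d.insert p.1
      ((d.getD p.1 PySem.Dict.empty).insert p.2
        ((d.getD p.1 PySem.Dict.empty).getD p.2 0 + 1)) := rfl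
  have hRfun : pvRadd = fun r (q : (String × String) × Int) => r.insert q.1.1
      ((r.getD q.1.1 PySem.Dict.empty).insert q.1.2 q.2) := rfl
  have hAnd : (P.foldl pvNadd PySem.Dict.empty).keys.Nodup := by
    exact PySem.Dict.nodup_keys_foldl_insert_key P Prod.fst
      (fun d p => ((d.getD p.1 PySem.Dict.empty).insert p.2
        ((d.getD p.1 PySem.Dict.empty).getD p.2 0 + 1))) PySem.Dict.empty
      (by rw [PySem.Dict.keys_empty]; exact List.nodup_nil)
  have hBnd : (L.foldl pvRadd PySem.Dict.empty).keys.Nodup := by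
    exact PySem.Dict.nodup_keys_foldl_insert_key L (fun q => q.1.1)
      (fun r q => ((r.getD q.1.1 PySem.Dict.empty).insert q.1.2 q.2)) PySem.Dict.empty
      (by rw [PySem.Dict.keys_empty]; exact List.nodup_nil)
  have hLmap : L.map (fun q => q.1.1) = (PySem.Set.ofList P).map Prod.fst := by
    rw [hL, PySem.Dict.items_counter, List.map_map]
    rfl
  have hkeys : (P.foldl pvNadd PySem.Dict.empty).keys = (L.foldl pvRadd PySem.Dict.empty).keys := by
    rw [hNfun, hRfun]
    rw [PySem.Dict.keys_foldl_insert_key P Prod.fst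
      (fun d p => ((d.getD p.1 PySem.Dict.empty).insert p.2
        ((d.getD p.1 PySem.Dict.empty).getD p.2 0 + 1))) PySem.Dict.empty]
    rw [PySem.Dict.keys_foldl_insert_key L (fun q => q.1.1)
      (fun r q => ((r.getD q.1.1 PySem.Dict.empty).insert q.1.2 q.2)) PySem.Dict.empty]
    rw [PySem.Dict.keys_empty, PySem.Set.update_nil_left, PySem.Set.update_nil_left,
      hLmap]
    exact (ofList_map_ofList Prod.fst P).symm
  have hgetD : ∀ g, (P.foldl pvNadd PySem.Dict.empty).getD g PySem.Dict.empty
      = (L.foldl pvRadd PySem.Dict.empty).getD g PySem.Dict.empty := by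
    intro g
    rw [getD_foldl_nadd, getD_foldl_radd, PySem.Dict.getD_empty,
      PySem.Dict.foldl_insert_getD_add_one_eq_counter]
    -- B side: filter the counter items down to kgram g
    have hfilter : L.filter (fun q => q.1.1 == g)
        = ((PySem.Set.ofList P).filter (fun p => p.1 == g)).map
            (fun p => (p, (P.count p : Int))) := by
      rw [hL, PySem.Dict.items_counter, List.filter_map]
      rfl
    rw [hfilter, List.foldl_map]
    have hnd : (((PySem.Set.ofList P).filter (fun p => p.1 == g)).map (·.2)).Nodup := by
      rw [map_snd_filter_ofList]
      exact PySem.Set.nodup_ofList _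
    apply PySem.Dict.ext
    rw [PySem.Dict.items_counter]
    have := PySem.Dict.items_foldl_insert_fresh
      ((PySem.Set.ofList P).filter (fun p => p.1 == g))
      (fun p => p.2) (fun p => (P.count p : Int)) PySem.Dict.empty
      (fun a _ => by simp [PySem.Dict.contains_empty]) hnd
    rw [this]
    rw [← map_snd_filter_ofList, List.map_map]
    rw [show (PySem.Dict.empty : PySem.Dict String Int).items = [] from rfl, List.nil_append]
    apply List.map_congr_left
    intro p hp
    obtain ⟨hpm, hp1⟩ := List.mem_filter.mp hp
    have h1 : p.1 = g := by rwa [beq_iff_eq] at hp1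
    simp only [Function.comp]
    rw [count_snd_filter P g p.2, show ((g, p.2) : String × String) = p from Prod.ext h1.symm rfl]
  apply PySem.Dict.ext
  rw [PySem.Dict.items_eq_map_keys _ hAnd PySem.Dict.empty,
    PySem.Dict.items_eq_map_keys _ hBnd PySem.Dict.empty, hkeys]
  exact List.map_congr_left (fun g _ => by rw [hgetD g])

-- ===== VERDICT (by name: the statement is the Claim_ definition above) =====
theorem get_grams_spec : Claim_equal_get_grams := by
  intro text k _ _
  unfold Spec_get_grams get_grams get_grams_alt
  refine congrArg (fun (D : PySem.Dict String (PySem.Dict String Int)) =>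
    D.items.map (fun p => (p.1, p.2.items))) ?_
  have hstep : (fun (d : PySem.Dict String (PySem.Dict String Int)) (i : Int) =>
      let key := PySem.Str.slice text (some i) (some (i + k))
      let d := if d.contains key then d else d.insert key PySem.Dict.empty
      let subkey := pvSub text (i + k)
      let m := d.getD key PySem.Dict.empty
      if m.contains subkey then d.insert key (m.insert subkey (m.getD subkey 0 + 1))
      else d.insert key (m.insert subkey 1))
      = (fun d i => pvNadd d (PySem.Str.slice text (some i) (some (i + k)), pvSub text (i + k))) :=
    funext fun d => funext fun i =>
      nadd_eq d (PySem.Str.slice text (some i) (some (i + k))) (pvSub text (i + k))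
  have hrstep : (fun (r : PySem.Dict String (PySem.Dict String Int))
      (q : (String × String) × Int) =>
      let r := r.setdefault q.1.1 PySem.Dict.empty
      r.insert q.1.1 ((r.getD q.1.1 PySem.Dict.empty).insert q.1.2 q.2)) = pvRadd :=
    funext fun r => funext fun q => radd_eq r q
  rw [hstep, hrstep, PySem.Dict.foldl_insert_getD_add_one_eq_counter, regroup_counter,
    List.foldl_map]
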